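-- pv_equiv track=rewrite | github.com/ontologymerging/NoisyOntologyMerging | MergingNoisyOntology_Semantic-Based/ModelBasedMerging.py | ListOfTripleFor_AIntersectionBSubsumeC
-- ===== SOURCE A (Python) =====
-- import itertools
--
-- def ListOfTripleFor_AIntersectionBSubsumeC(primaryConcept):
--     ListOfTriple_FromConceptName=[]
--     for eachTriple in list(itertools.permutations(primaryConcept,3)):
--         if len(ListOfTriple_FromConceptName)>0:
--             Flag=False
--             for each in ListOfTriple_FromConceptName:
--                 if eachTriple[2] == each[2]:
--                     Flag = True
--                     break
--             if Flag == False: ListOfTriple_FromConceptName.append(eachTriple)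
--         else: ListOfTriple_FromConceptName.append(eachTriple)
--     return ListOfTriple_FromConceptName
-- ===== SOURCE B (Python) =====
-- def ListOfTripleFor_AIntersectionBSubsumeC(primaryConcept):
--     # For each distinct value v occurring as the third component of some length-3
--     # permutation, the first permutation (in itertools order) with third value v is
--     # (p[0],p[1],p[k]) for the least k>=2 with p[k]==v, else (p[0],p[2],p[1]) if
--     # v==p[1], else (p[1],p[2],p[0]).  Scan k in that first-appearance order.
--     n = len(primaryConcept)
--     if n < 3:
--         return []
--     result = []
--     seen = set()
--     for k in list(range(2, n)) + [1, 0]: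
--         v = primaryConcept[k]
--         if v not in seen:
--             seen.add(v)
--             if k >= 2:
--                 result.append((primaryConcept[0], primaryConcept[1], v))
--             elif k == 1:
--                 result.append((primaryConcept[0], primaryConcept[2], v))
--             else:
--                 result.append((primaryConcept[1], primaryConcept[2], v))
--     return result
-- ===== Notes on version B (the rewrite author's own statement) =====
-- stated objective: faster
-- what changed: Instead of enumerating all n(n-1)(n-2) length-3 permutations and scanning the kept list for each one, B directly emits, per distinct value in first-appearance order of the third position (indices 2..n-1, then 1, then 0), the lexicographically first permutation with that third value, using a seen-set.
import Mathlib
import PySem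

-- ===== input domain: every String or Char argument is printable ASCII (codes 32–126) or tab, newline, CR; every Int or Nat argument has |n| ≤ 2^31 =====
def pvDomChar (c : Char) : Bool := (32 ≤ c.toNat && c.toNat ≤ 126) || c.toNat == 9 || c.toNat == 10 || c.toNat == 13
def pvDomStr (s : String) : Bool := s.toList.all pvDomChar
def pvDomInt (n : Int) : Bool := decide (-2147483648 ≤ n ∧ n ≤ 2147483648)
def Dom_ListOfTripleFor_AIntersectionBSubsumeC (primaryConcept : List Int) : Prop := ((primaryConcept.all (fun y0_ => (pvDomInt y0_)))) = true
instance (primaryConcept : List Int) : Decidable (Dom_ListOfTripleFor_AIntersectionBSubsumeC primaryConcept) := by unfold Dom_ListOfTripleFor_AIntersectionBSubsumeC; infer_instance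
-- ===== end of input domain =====

-- B replaces A's scan over all n(n-1)(n-2) permutations (with an inner scan of the kept
-- list) by directly emitting, per distinct third-position value in first-appearance
-- order (k = 2..n-1, then 1, then 0), the first permutation with that third value.

-- ===== PORT A =====
-- itertools.permutations(xs, 3): index triples (i,j,k) of pairwise-distinct indices in
-- lexicographic order, mapped to their values; exact port of the built-in's order.
def pyPerms3 (xs : List Int) : List (List Int) :=
  (List.range xs.length).flatMap fun i =>
    (List.range xs.length).flatMap fun j =>
      (List.range xs.length).filterMap fun k =>
        if i ≠ j ∧ k ≠ i ∧ k ≠ j then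
          some [xs.getD i 0, xs.getD j 0, xs.getD k 0]
        else none

def ListOfTripleFor_AIntersectionBSubsumeC (primaryConcept : List Int) : List (List Int) :=
  (pyPerms3 primaryConcept).foldl
    (fun acc eachTriple =>
      if acc.length > 0 then
        if acc.any (fun each => eachTriple.getD 2 0 == each.getD 2 0) then acc
        else acc ++ [eachTriple]
      else acc ++ [eachTriple])
    []

-- ===== PORT B =====
def altTriple (p : List Int) (k : Nat) : List Int :=
  if 2 ≤ k then [p.getD 0 0, p.getD 1 0, p.getD k 0]
  else if k = 1 then [p.getD 0 0, p.getD 2 0, p.getD 1 0]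
  else [p.getD 1 0, p.getD 2 0, p.getD 0 0]

def altGo (p : List Int) : List Nat → PySem.Set Int → List (List Int)
  | [], _ => []
  | k :: ks, seen =>
    let v := p.getD k 0
    if PySem.Set.contains seen v then altGo p ks seen
    else altTriple p k :: altGo p ks (PySem.Set.add seen v)

def ListOfTripleFor_AIntersectionBSubsumeC_alt (primaryConcept : List Int) : List (List Int) :=
  if primaryConcept.length < 3 then []
  else altGo primaryConcept
        (List.range' 2 (primaryConcept.length - 2) ++ [1, 0]) PySem.Set.empty

-- ===== PRECONDITION & SPEC =====
def Spec_ListOfTripleFor_AIntersectionBSubsumeC (primaryConcept : List Int) (out : List (List Int)) : Prop := out = ListOfTripleFor_AIntersectionBSubsumeC_alt primaryConcept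
instance (primaryConcept : List Int) (out : List (List Int)) : Decidable (Spec_ListOfTripleFor_AIntersectionBSubsumeC primaryConcept out) := by unfold Spec_ListOfTripleFor_AIntersectionBSubsumeC; infer_instance

-- ===== CLAIM (what is proved, stated in full; the proofs are below) =====
def Claim_equal_ListOfTripleFor_AIntersectionBSubsumeC : Prop := ∀ (primaryConcept : List Int), Dom_ListOfTripleFor_AIntersectionBSubsumeC primaryConcept → Spec_ListOfTripleFor_AIntersectionBSubsumeC primaryConcept (ListOfTripleFor_AIntersectionBSubsumeC primaryConcept)

-- ===== LEMMAS AND PROOFS =====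

-- A's loop body, with the redundant `len(acc) > 0` wrapper removed.
def pvStep (acc : List (List Int)) (t : List Int) : List (List Int) :=
  if acc.any (fun e => t.getD 2 0 == e.getD 2 0) then acc else acc ++ [t]

theorem A_eq_fold (p : List Int) :
    ListOfTripleFor_AIntersectionBSubsumeC p = (pyPerms3 p).foldl pvStep [] := by
  unfold ListOfTripleFor_AIntersectionBSubsumeC
  congr 1
  funext acc t
  cases acc <;> simp [pvStep]

-- the value-level pieces of pyPerms3
def pvT (p : List Int) (i j k : Nat) : List Int := [p.getD i 0, p.getD j 0, p.getD k 0]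
def pvH (p : List Int) (i j : Nat) (k : Nat) : Option (List Int) :=
  if i ≠ j ∧ k ≠ i ∧ k ≠ j then some (pvT p i j k) else none
def pvG (p : List Int) (i j : Nat) : List (List Int) := (List.range p.length).filterMap (pvH p i j)
def pvF (p : List Int) (i : Nat) : List (List Int) := (List.range p.length).flatMap (pvG p i)

theorem perms_eq (p : List Int) : pyPerms3 p = (List.range p.length).flatMap (pvF p) := rfl

-- seen-set scan characterisation of A's dedup fold
def pvScan (S : List Int) : List (List Int) → List (List Int)
  | [] => []
  | t :: L => if t.getD 2 0 ∈ S then pvScan S L else t :: pvScan (t.getD 2 0 :: S) L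

theorem pvScan_cons (S : List Int) (t : List Int) (L : List (List Int)) :
    pvScan S (t :: L) =
      if t.getD 2 0 ∈ S then pvScan S L else t :: pvScan (t.getD 2 0 :: S) L := rfl

theorem fold_eq_scan (L : List (List Int)) :
    ∀ (acc : List (List Int)) (S : List Int),
      (∀ x : Int, (∃ e ∈ acc, e.getD 2 0 = x) ↔ x ∈ S) →
      L.foldl pvStep acc = acc ++ pvScan S L := by
  induction L with
  | nil => intro acc S _; simp [pvScan]
  | cons t L ih =>
    intro acc S h
    by_cases hm : t.getD 2 0 ∈ S
    · have hany : acc.any (fun e => t.getD 2 0 == e.getD 2 0) = true := by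
        rcases (h (t.getD 2 0)).2 hm with ⟨e, he, hk⟩
        simp only [List.any_eq_true]
        exact ⟨e, he, by simp only [beq_iff_eq]; exact hk.symm⟩
      simp only [List.foldl_cons, pvStep, hany, if_pos, pvScan, hm, if_pos]
      exact ih acc S h
    · have hany : acc.any (fun e => t.getD 2 0 == e.getD 2 0) = false := by
        simp only [List.any_eq_false]
        intro e he
        simp only [beq_iff_eq]
        intro hk
        exact hm ((h (t.getD 2 0)).1 ⟨e, he, hk.symm⟩)
      simp only [List.foldl_cons, pvStep, hany, pvScan, hm, if_neg, Bool.false_eq_true,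
        not_false_eq_true, if_false]
      rw [ih (acc ++ [t]) (t.getD 2 0 :: S) ?_, List.append_assoc]
      · rfl
      · intro x
        constructor
        · rintro ⟨e, he, hk⟩
          rcases List.mem_append.1 he with h1 | h1
          · exact List.mem_cons_of_mem _ ((h x).1 ⟨e, h1, hk⟩)
          · simp only [List.mem_singleton] at h1
            subst h1; subst hk; exact List.mem_cons_self
        · intro hx
          rcases List.mem_cons.1 hx with h1 | h1
          · exact ⟨t, by simp, h1.symm⟩
          · rcases (h x).2 h1 with ⟨e, he, hk⟩
            exact ⟨e, List.mem_append_left _ he, hk⟩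

theorem scan_congr (L : List (List Int)) :
    ∀ (S S' : List Int), (∀ x, x ∈ S ↔ x ∈ S') → pvScan S L = pvScan S' L := by
  induction L with
  | nil => intro _ _ _; rfl
  | cons t L ih =>
    intro S S' h
    by_cases hm : t.getD 2 0 ∈ S
    · simp only [pvScan, if_pos hm, if_pos ((h _).1 hm)]
      exact ih S S' h
    · simp only [pvScan, if_neg hm, if_neg (fun hx => hm ((h _).2 hx))]
      refine congrArg _ (ih _ _ ?_)
      intro x
      simp only [List.mem_cons]
      exact or_congr Iff.rfl (h x)

theorem scan_nil (L : List (List Int)) :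
    ∀ (S : List Int), (∀ t ∈ L, t.getD 2 0 ∈ S) → pvScan S L = [] := by
  induction L with
  | nil => intro _ _; rfl
  | cons t L ih =>
    intro S h
    simp only [pvScan, if_pos (h t (by simp))]
    exact ih S (fun u hu => h u (by simp [hu]))

theorem scan_append (L1 : List (List Int)) :
    ∀ (L2 : List (List Int)) (S : List Int),
      pvScan S (L1 ++ L2) = pvScan S L1 ++ pvScan (L1.map (fun t => t.getD 2 0) ++ S) L2 := by
  induction L1 with
  | nil => intro L2 S; rfl
  | cons t L1 ih =>
    intro L2 S
    by_cases hm : t.getD 2 0 ∈ S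
    · simp only [List.cons_append, pvScan, if_pos hm, ih]
      refine congrArg _ (scan_congr _ _ _ ?_)
      intro x
      simp only [List.map_cons, List.cons_append, List.mem_cons, List.mem_append]
      constructor
      · rintro (h | h) <;> simp_all
      · rintro (h | h | h) <;> simp_all
    · simp only [List.cons_append, pvScan, if_neg hm, ih]
      refine congrArg _ (congrArg _ (scan_congr _ _ _ ?_))
      intro x
      simp only [List.map_cons, List.cons_append, List.mem_cons, List.mem_append]
      tauto

theorem scan_drop (L1 L2 : List (List Int)) (S : List Int)
    (h : ∀ t ∈ L1, t.getD 2 0 ∈ S) : pvScan S (L1 ++ L2) = pvScan S L2 := by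
  rw [scan_append, scan_nil _ _ h, List.nil_append]
  refine scan_congr _ _ _ ?_
  intro x
  simp only [List.mem_append, List.mem_map]
  constructor
  · rintro (⟨t, ht, hk⟩ | hx)
    · exact hk ▸ h t ht
    · exact hx
  · exact fun hx => Or.inr hx

-- filterMap computation helpers
theorem fm_map {β : Type} (l : List Nat) (f : Nat → Option β) (g : Nat → β)
    (h : ∀ a ∈ l, f a = some (g a)) : l.filterMap f = l.map g := by
  induction l with
  | nil => rfl
  | cons a l ih =>
    simp only [List.filterMap_cons, h a (by simp), List.map_cons]
    exact congrArg _ (ih (fun a ha => h a (by simp [ha])))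

-- ===== B-side loop lemmas =====

theorem altGo_append (p : List Int) (l1 : List Nat) :
    ∀ (l2 : List Nat) (seen : PySem.Set Int),
      altGo p (l1 ++ l2) seen =
        altGo p l1 seen ++
          altGo p l2 (l1.foldl (fun s k => PySem.Set.add s (p.getD k 0)) seen) := by
  induction l1 with
  | nil => intro l2 seen; rfl
  | cons k l1 ih =>
    intro l2 seen
    by_cases hc : PySem.Set.contains seen (p.getD k 0) = true
    · have hadd : PySem.Set.add seen (p.getD k 0) = seen := by
        unfold PySem.Set.add; rw [if_pos hc]
      simp only [List.cons_append, altGo, hc, if_pos, List.foldl_cons, hadd]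
      exact ih l2 seen
    · simp only [List.cons_append, altGo, hc, Bool.false_eq_true, if_neg, List.foldl_cons,
        not_false_eq_true]
      rw [ih]

theorem scan_block (p : List Int) (ks : List Nat) :
    ∀ (S : List Int) (seen : PySem.Set Int),
      (∀ k ∈ ks, 2 ≤ k) → (∀ x, x ∈ S ↔ x ∈ seen) →
      pvScan S (ks.map (pvT p 0 1)) = altGo p ks seen := by
  induction ks with
  | nil => intro _ _ _ _; rfl
  | cons k ks ih =>
    intro S seen hks h
    have hk2 : 2 ≤ k := hks k (by simp)
    have hkey : (pvT p 0 1 k).getD 2 0 = p.getD k 0 := rfl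
    by_cases hm : p.getD k 0 ∈ S
    · have hc : PySem.Set.contains seen (p.getD k 0) = true :=
        (PySem.Set.contains_iff _ _).2 ((h _).1 hm)
      simp only [List.map_cons, pvScan, hkey, if_pos hm, altGo, hc, if_pos]
      exact ih S seen (fun a ha => hks a (by simp [ha])) h
    · have hc : ¬ PySem.Set.contains seen (p.getD k 0) = true := by
        rw [PySem.Set.contains_iff]
        exact fun hx => hm ((h _).2 hx)
      simp only [List.map_cons, pvScan, hkey, if_neg hm, altGo, hc, if_neg, Bool.false_eq_true,
        not_false_eq_true]
      have htr : pvT p 0 1 k = altTriple p k := by simp [pvT, altTriple, hk2]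
      rw [htr]
      refine congrArg _ (ih _ _ (fun a ha => hks a (by simp [ha])) ?_)
      intro x
      rw [PySem.Set.mem_add]
      simp only [List.mem_cons]
      rw [h x]
      tauto

-- ===== structural decomposition of pyPerms3 (p.length = m + 3) =====

theorem G00 (p : List Int) : pvG p 0 0 = [] := by
  simp [pvG, pvH, List.filterMap_eq_nil_iff]

theorem G11 (p : List Int) : pvG p 1 1 = [] := by
  simp [pvG, pvH, List.filterMap_eq_nil_iff]

theorem range_split2 (m : Nat) : List.range (m + 3) = 0 :: 1 :: List.range' 2 (m + 1) := by
  rw [List.range_eq_range']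
  rfl

theorem range_split3 (m : Nat) :
    List.range (m + 3) = 0 :: 1 :: 2 :: List.range' 3 m := by
  rw [List.range_eq_range']
  rfl

theorem G01 (p : List Int) (m : Nat) (hn : p.length = m + 3) :
    pvG p 0 1 = (List.range' 2 (m + 1)).map (pvT p 0 1) := by
  unfold pvG
  rw [hn, range_split2]
  simp only [List.filterMap_cons]
  have h0 : pvH p 0 1 0 = none := by simp [pvH]
  have h1 : pvH p 0 1 1 = none := by simp [pvH]
  rw [h0, h1]
  exact fm_map _ _ _ (fun k hk => by
    have : 2 ≤ k := (List.mem_range'_1.1 hk).1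
    simp [pvH]; omega)

theorem G10 (p : List Int) (m : Nat) (hn : p.length = m + 3) :
    pvG p 1 0 = (List.range' 2 (m + 1)).map (pvT p 1 0) := by
  unfold pvG
  rw [hn, range_split2]
  simp only [List.filterMap_cons]
  have h0 : pvH p 1 0 0 = none := by simp [pvH]
  have h1 : pvH p 1 0 1 = none := by simp [pvH]
  rw [h0, h1]
  exact fm_map _ _ _ (fun k hk => by
    have : 2 ≤ k := (List.mem_range'_1.1 hk).1
    simp [pvH]; omega)

theorem G02 (p : List Int) (m : Nat) (hn : p.length = m + 3) :
    pvG p 0 2 = pvT p 0 2 1 :: (List.range' 3 m).map (pvT p 0 2) := by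
  unfold pvG
  rw [hn, range_split3]
  simp only [List.filterMap_cons]
  have h0 : pvH p 0 2 0 = none := by simp [pvH]
  have h1 : pvH p 0 2 1 = some (pvT p 0 2 1) := by simp [pvH]
  have h2 : pvH p 0 2 2 = none := by simp [pvH]
  rw [h0, h1, h2]
  exact congrArg _ (fm_map _ _ _ (fun k hk => by
    have : 3 ≤ k := (List.mem_range'_1.1 hk).1
    simp [pvH]; omega))

theorem G12 (p : List Int) (m : Nat) (hn : p.length = m + 3) :
    pvG p 1 2 = pvT p 1 2 0 :: (List.range' 3 m).map (pvT p 1 2) := by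
  unfold pvG
  rw [hn, range_split3]
  simp only [List.filterMap_cons]
  have h0 : pvH p 1 2 0 = some (pvT p 1 2 0) := by simp [pvH]
  have h1 : pvH p 1 2 1 = none := by simp [pvH]
  have h2 : pvH p 1 2 2 = none := by simp [pvH]
  rw [h0, h1, h2]
  exact congrArg _ (fm_map _ _ _ (fun k hk => by
    have : 3 ≤ k := (List.mem_range'_1.1 hk).1
    simp [pvH]; omega))

-- every element of pvG p i j is pvT p i j k for some in-range k ≠ i
theorem mem_G (p : List Int) (i j : Nat) (t : List Int) (ht : t ∈ pvG p i j) :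
    ∃ k, k < p.length ∧ k ≠ i ∧ t.getD 2 0 = p.getD k 0 := by
  simp only [pvG, List.mem_filterMap, List.mem_range] at ht
  rcases ht with ⟨k, hk, hsome⟩
  unfold pvH at hsome
  split at hsome
  · rename_i hcond
    cases hsome
    exact ⟨k, hk, hcond.2.1, rfl⟩
  · cases hsome

theorem mem_F (p : List Int) (i : Nat) (t : List Int) (ht : t ∈ pvF p i) :
    ∃ k, k < p.length ∧ k ≠ i ∧ t.getD 2 0 = p.getD k 0 := by
  simp only [pvF, List.mem_flatMap, List.mem_range] at ht
  rcases ht with ⟨j, _, htg⟩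
  exact mem_G p i j t htg

-- trivial case: fewer than 3 elements means no permutations at all
theorem perms_small (p : List Int) (h : p.length < 3) : pyPerms3 p = [] := by
  rw [List.eq_nil_iff_forall_not_mem]
  intro t ht
  simp only [pyPerms3, List.mem_flatMap, List.mem_filterMap, List.mem_range] at ht
  rcases ht with ⟨i, hi, j, hj, k, hk, hsome⟩
  split at hsome
  · rename_i hcond
    omega
  · cases hsome

-- main equivalence
theorem main_eq (p : List Int) :
    ListOfTripleFor_AIntersectionBSubsumeC p = ListOfTripleFor_AIntersectionBSubsumeC_alt p := by
  by_cases hsmall : p.length < 3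
  · rw [A_eq_fold, perms_small p hsmall]
    simp [ListOfTripleFor_AIntersectionBSubsumeC_alt, hsmall]
  · obtain ⟨m, hn⟩ : ∃ m, p.length = m + 3 := ⟨p.length - 3, by omega⟩
    -- abbreviations
    set v0 := p.getD 0 0 with hv0
    set v1 := p.getD 1 0 with hv1
    set V : List Int := (List.range' 2 (m + 1)).map (fun k => p.getD k 0) with hV
    -- decomposition of the permutation list
    have hMidKey : ∀ t ∈ ((List.range' 3 m).map (pvT p 0 2) ++
        ((List.range' 3 m).flatMap (pvG p 0) ++ (List.range' 2 (m + 1)).map (pvT p 1 0))),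
        ∃ k, 1 ≤ k ∧ k < p.length ∧ t.getD 2 0 = p.getD k 0 := by
      intro t ht
      rcases List.mem_append.1 ht with h1 | h1
      · rcases List.mem_map.1 h1 with ⟨k, hk, rfl⟩
        have := List.mem_range'_1.1 hk
        exact ⟨k, by omega, by omega, rfl⟩
      rcases List.mem_append.1 h1 with h2 | h2
      · rcases List.mem_flatMap.1 h2 with ⟨j, _, htg⟩
        rcases mem_G p 0 j t htg with ⟨k, hk1, hk2, hk3⟩
        exact ⟨k, by omega, hk1, hk3⟩
      · rcases List.mem_map.1 h2 with ⟨k, hk, rfl⟩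
        have := List.mem_range'_1.1 hk
        exact ⟨k, by omega, by omega, rfl⟩
    have hPostKey : ∀ t ∈ ((List.range' 3 m).map (pvT p 1 2) ++
        ((List.range' 3 m).flatMap (pvG p 1) ++ (List.range' 2 (m + 1)).flatMap (pvF p))),
        ∃ k, k < p.length ∧ t.getD 2 0 = p.getD k 0 := by
      intro t ht
      rcases List.mem_append.1 ht with h1 | h1
      · rcases List.mem_map.1 h1 with ⟨k, hk, rfl⟩
        have := List.mem_range'_1.1 hk
        exact ⟨k, by omega, rfl⟩
      rcases List.mem_append.1 h1 with h2 | h2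
      · rcases List.mem_flatMap.1 h2 with ⟨j, _, htg⟩
        rcases mem_G p 1 j t htg with ⟨k, hk1, _, hk3⟩
        exact ⟨k, hk1, hk3⟩
      · rcases List.mem_flatMap.1 h2 with ⟨i, _, htf⟩
        rcases mem_F p i t htf with ⟨k, hk1, _, hk3⟩
        exact ⟨k, hk1, hk3⟩
    have hdecomp : pyPerms3 p =
        (List.range' 2 (m + 1)).map (pvT p 0 1) ++
          (pvT p 0 2 1 ::
            (((List.range' 3 m).map (pvT p 0 2) ++
              ((List.range' 3 m).flatMap (pvG p 0) ++ (List.range' 2 (m + 1)).map (pvT p 1 0))) ++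
             (pvT p 1 2 0 ::
              ((List.range' 3 m).map (pvT p 1 2) ++
                ((List.range' 3 m).flatMap (pvG p 1) ++
                  (List.range' 2 (m + 1)).flatMap (pvF p)))))) := by
      rw [perms_eq, hn, range_split2 m]
      simp only [List.flatMap_cons]
      have hF0 : pvF p 0 = pvG p 0 0 ++ (pvG p 0 1 ++ (pvG p 0 2 ++ (List.range' 3 m).flatMap (pvG p 0))) := by
        unfold pvF
        rw [hn, range_split3 m]
        simp [List.flatMap_cons]
      have hF1 : pvF p 1 = pvG p 1 0 ++ (pvG p 1 1 ++ (pvG p 1 2 ++ (List.range' 3 m).flatMap (pvG p 1))) := by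
        unfold pvF
        rw [hn, range_split3 m]
        simp [List.flatMap_cons]
      rw [hF0, hF1, G00, G11, G01 p m hn, G02 p m hn, G10 p m hn, G12 p m hn]
      simp [List.append_assoc]
    -- value facts about membership in V
    have hVmem : ∀ x : Int, x ∈ V ↔ ∃ k, 2 ≤ k ∧ k < p.length ∧ p.getD k 0 = x := by
      intro x
      simp only [hV, List.mem_map, List.mem_range'_1]
      constructor
      · rintro ⟨k, ⟨h1, h2⟩, h3⟩; exact ⟨k, h1, by omega, h3⟩
      · rintro ⟨k, h1, h2, h3⟩; exact ⟨k, ⟨h1, by omega⟩, h3⟩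
    -- A's side: fold = scan
    have hA : ListOfTripleFor_AIntersectionBSubsumeC p = pvScan [] (pyPerms3 p) := by
      rw [A_eq_fold]
      rw [fold_eq_scan _ [] []] <;> simp
    -- the key of the block triples
    have hblockkeys : ((List.range' 2 (m + 1)).map (pvT p 0 1)).map (fun t => t.getD 2 0) = V := by
      simp only [List.map_map, hV]
      rfl
    -- scan of the whole thing
    have hseenF :
        ∀ x : Int, x ∈ ((List.range' 2 (m + 1)).foldl
            (fun s k => PySem.Set.add s (p.getD k 0)) (PySem.Set.empty : PySem.Set Int)) ↔ x ∈ V := by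
      intro x
      rw [← PySem.Set.update_map_eq_foldl_add, ← hV]
      show x ∈ PySem.Set.update ([] : PySem.Set Int) V ↔ x ∈ V
      rw [PySem.Set.update_nil_left, PySem.Set.mem_ofList]
    -- B's side
    have hB : ListOfTripleFor_AIntersectionBSubsumeC_alt p =
        altGo p (List.range' 2 (m + 1)) PySem.Set.empty ++
          altGo p [1, 0] ((List.range' 2 (m + 1)).foldl
            (fun s k => PySem.Set.add s (p.getD k 0)) PySem.Set.empty) := by
      unfold ListOfTripleFor_AIntersectionBSubsumeC_alt
      rw [if_neg (by omega)]
      have : p.length - 2 = m + 1 := by omega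
      rw [this, altGo_append]
    -- phase 1 agreement
    have hphase1 : pvScan [] ((List.range' 2 (m + 1)).map (pvT p 0 1)) =
        altGo p (List.range' 2 (m + 1)) PySem.Set.empty := by
      refine scan_block p _ [] PySem.Set.empty (fun k hk => (List.mem_range'_1.1 hk).1) ?_
      intro x; simp [PySem.Set.empty]
    -- put A together
    rw [hA, hdecomp, scan_append, hphase1, hblockkeys, List.append_nil, hB]
    refine congrArg _ ?_
    -- now: pvScan V (T021 :: (Mid ++ T120 :: Post)) = altGo p [1,0] seenF
    have hk021 : (pvT p 0 2 1).getD 2 0 = v1 := rfl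
    have hk120 : (pvT p 1 2 0).getD 2 0 = v0 := rfl
    have hMidV1 : ∀ t ∈ ((List.range' 3 m).map (pvT p 0 2) ++
        ((List.range' 3 m).flatMap (pvG p 0) ++ (List.range' 2 (m + 1)).map (pvT p 1 0))),
        t.getD 2 0 = v1 ∨ t.getD 2 0 ∈ V := by
      intro t ht
      rcases hMidKey t ht with ⟨k, hk1, hk2, hk3⟩
      rcases Nat.lt_or_ge k 2 with h | h
      · left; rw [hk3]; have : k = 1 := by omega
        rw [this]
      · right; rw [hk3]; exact (hVmem _).2 ⟨k, h, hk2, rfl⟩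
    have hPostV : ∀ t ∈ ((List.range' 3 m).map (pvT p 1 2) ++
        ((List.range' 3 m).flatMap (pvG p 1) ++ (List.range' 2 (m + 1)).flatMap (pvF p))),
        t.getD 2 0 = v0 ∨ t.getD 2 0 = v1 ∨ t.getD 2 0 ∈ V := by
      intro t ht
      rcases hPostKey t ht with ⟨k, hk1, hk3⟩
      rcases Nat.lt_or_ge k 2 with h | h
      · interval_cases k
        · left; rw [hk3]
        · right; left; rw [hk3]
      · right; right; rw [hk3]; exact (hVmem _).2 ⟨k, h, hk1, rfl⟩
    by_cases h1 : v1 ∈ V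
    · -- v1 already covered by the block
      have hc1 : PySem.Set.contains ((List.range' 2 (m + 1)).foldl
          (fun s k => PySem.Set.add s (p.getD k 0)) PySem.Set.empty) (p.getD 1 0) = true :=
        (PySem.Set.contains_iff _ _).2 ((hseenF _).2 h1)
      rw [pvScan_cons, hk021, if_pos h1]
      rw [scan_drop _ _ _ (fun t ht => by
        rcases hMidV1 t ht with h | h
        · rw [h]; exact h1
        · exact h)]
      simp only [altGo, hc1, if_pos]
      by_cases h0 : v0 ∈ V
      · have hc0 : PySem.Set.contains ((List.range' 2 (m + 1)).foldl
            (fun s k => PySem.Set.add s (p.getD k 0)) PySem.Set.empty) (p.getD 0 0) = true :=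
          (PySem.Set.contains_iff _ _).2 ((hseenF _).2 h0)
        rw [pvScan_cons, hk120, if_pos h0]
        rw [scan_nil _ _ (fun t ht => by
          rcases hPostV t ht with h | h | h
          · rw [h]; exact h0
          · rw [h]; exact h1
          · exact h)]
        simp only [altGo, hc0, if_pos]
      · have hc0 : ¬ PySem.Set.contains ((List.range' 2 (m + 1)).foldl
            (fun s k => PySem.Set.add s (p.getD k 0)) PySem.Set.empty) (p.getD 0 0) = true := by
          rw [PySem.Set.contains_iff]
          exact fun hx => h0 ((hseenF _).1 hx)
        rw [pvScan_cons, hk120, if_neg h0]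
        rw [scan_nil _ _ (fun t ht => by
          rcases hPostV t ht with h | h | h
          · rw [h]; exact List.mem_cons_self
          · rw [h]; exact List.mem_cons_of_mem _ h1
          · exact List.mem_cons_of_mem _ h)]
        simp only [altGo, hc0, Bool.false_eq_true, if_neg, not_false_eq_true]
        rfl
    · -- v1 is new: the (0,2,1) permutation is kept
      have hc1 : ¬ PySem.Set.contains ((List.range' 2 (m + 1)).foldl
          (fun s k => PySem.Set.add s (p.getD k 0)) PySem.Set.empty) (p.getD 1 0) = true := by
        rw [PySem.Set.contains_iff]
        exact fun hx => h1 ((hseenF _).1 hx)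
      rw [pvScan_cons, hk021, if_neg h1]
      rw [scan_drop _ _ _ (fun t ht => by
        rcases hMidV1 t ht with h | h
        · rw [h]; exact List.mem_cons_self
        · exact List.mem_cons_of_mem _ h)]
      simp only [altGo, hc1, Bool.false_eq_true, if_neg, not_false_eq_true]
      have htr1 : pvT p 0 2 1 = altTriple p 1 := rfl
      rw [htr1]
      refine congrArg _ ?_
      have hmem_add01 : ∀ x : Int, x ∈ PySem.Set.add ((List.range' 2 (m + 1)).foldl
          (fun s k => PySem.Set.add s (p.getD k 0)) PySem.Set.empty) (p.getD 1 0) ↔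
          (x = v1 ∨ x ∈ V) := by
        intro x
        rw [PySem.Set.mem_add, hseenF]
        tauto
      by_cases h0 : v0 = v1 ∨ v0 ∈ V
      · have hc0 : PySem.Set.contains (PySem.Set.add ((List.range' 2 (m + 1)).foldl
            (fun s k => PySem.Set.add s (p.getD k 0)) PySem.Set.empty) (p.getD 1 0)) (p.getD 0 0) = true :=
          (PySem.Set.contains_iff _ _).2 ((hmem_add01 _).2 h0)
        rw [pvScan_cons, hk120, if_pos (by
          rcases h0 with h | h
          · rw [h]; exact List.mem_cons_self
          · exact List.mem_cons_of_mem _ h)]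
        rw [scan_nil _ _ (fun t ht => by
          rcases hPostV t ht with h | h | h
          · rw [h]; rcases h0 with h' | h'
            · rw [h']; exact List.mem_cons_self
            · exact List.mem_cons_of_mem _ h'
          · rw [h]; exact List.mem_cons_self
          · exact List.mem_cons_of_mem _ h)]
        simp only [altGo, hc0, if_pos]
      · have hc0 : ¬ PySem.Set.contains (PySem.Set.add ((List.range' 2 (m + 1)).foldl
            (fun s k => PySem.Set.add s (p.getD k 0)) PySem.Set.empty) (p.getD 1 0)) (p.getD 0 0) = true := by
          rw [PySem.Set.contains_iff]
          exact fun hx => h0 ((hmem_add01 _).1 hx)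
        rw [pvScan_cons, hk120, if_neg (by
          intro hx
          rcases List.mem_cons.1 hx with h | h
          · exact h0 (Or.inl h)
          · exact h0 (Or.inr h))]
        rw [scan_nil _ _ (fun t ht => by
          rcases hPostV t ht with h | h | h
          · rw [h]; exact List.mem_cons_self
          · rw [h]; exact List.mem_cons_of_mem _ List.mem_cons_self
          · exact List.mem_cons_of_mem _ (List.mem_cons_of_mem _ h))]
        simp only [altGo, hc0, Bool.false_eq_true, if_neg, not_false_eq_true]
        rfl

-- ===== VERDICT (by name: the statement is the Claim_ definition above) =====
theorem ListOfTripleFor_AIntersectionBSubsumeC_spec : Claim_equal_ListOfTripleFor_AIntersectionBSubsumeC := by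
  intro p _
  unfold Spec_ListOfTripleFor_AIntersectionBSubsumeC
  exact main_eq p
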